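-- pv_equiv track=rewrite | github.com/CryptoExperts/AC21-divprop-convexity | packages/divprop/tests/test_DivCore.py | anf
-- ===== SOURCE A (Python) =====
-- def log2ceil(n):
--     return int(n-1).bit_length()
--
-- def anf(arr):
--     arr = list(arr)
--     n = log2ceil(len(arr))
--     assert len(arr) == 2**n, len(arr)
--     for k in range(n):
--         halfstep = 1 << k
--         step = 2 << k
--         for i in range(0, len(arr), step):
--             for j in range(0, halfstep):
--                 arr[i + j + halfstep] ^= arr[i + j]
--     return arr
-- ===== SOURCE B (Python) =====
-- def log2ceil(n):
--     return int(n-1).bit_length()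
--
--
-- def _anf_rec(a):
--     # divide and conquer on the top bit: transform both halves, then fold the
--     # (transformed) lower half into the upper half
--     if len(a) <= 1:
--         return list(a)
--     h = len(a) // 2
--     L = _anf_rec(a[:h])
--     R = _anf_rec(a[h:])
--     return L + [r ^ l for r, l in zip(R, L)]
--
--
-- def anf(arr):
--     arr = list(arr)
--     n = log2ceil(len(arr))
--     assert len(arr) == 2**n, len(arr)
--     return _anf_rec(arr)
-- ===== Notes on version B (the rewrite author's own statement) =====
-- stated objective: alternative
-- what changed: Replaced the in-place bottom-up triple loop over bit stages by a recursive divide-and-conquer: split the array in halves, transform each half recursively, then xor the transformed lower half into the transformed upper half.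
import Mathlib
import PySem

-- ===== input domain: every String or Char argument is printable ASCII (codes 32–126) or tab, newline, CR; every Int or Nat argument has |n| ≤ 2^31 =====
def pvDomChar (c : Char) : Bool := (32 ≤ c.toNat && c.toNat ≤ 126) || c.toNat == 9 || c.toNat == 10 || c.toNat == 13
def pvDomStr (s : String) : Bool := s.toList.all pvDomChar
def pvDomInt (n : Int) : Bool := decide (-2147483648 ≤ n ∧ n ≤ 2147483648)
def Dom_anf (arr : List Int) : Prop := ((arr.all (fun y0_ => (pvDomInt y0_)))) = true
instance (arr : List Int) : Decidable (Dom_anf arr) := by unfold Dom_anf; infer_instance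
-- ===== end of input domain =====

-- B replaces A's in-place bottom-up butterfly loops by a recursive divide-and-conquer
-- on the halves (objective: alternative decomposition, same asymptotic cost).

-- ===== PORT A =====
def log2ceil (n : Int) : Int := (PySem.Int.bitLength (n - 1) : Int)   -- int(n-1).bit_length()

-- the innermost j-loop: for j in range(0, halfstep): arr[i+j+halfstep] ^= arr[i+j]
-- (all indices are nonnegative and in range whenever the assert has passed)
def anfInner (i halfstep : Int) (a : List Int) : List Int :=
  (PySem.List.pyRange 0 halfstep 1).foldl
    (fun a j => PySem.List.pySetD a (i + j + halfstep)
      (PySem.Int.bxor (PySem.List.pyGetD a (i + j + halfstep) 0)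
                      (PySem.List.pyGetD a (i + j) 0))) a

-- the i-loop of one stage k (k ≥ 0 always, so 1 << k is 1 <<< k.toNat)
def anfOuter (a : List Int) (k : Int) : List Int :=
  let halfstep : Int := 1 <<< k.toNat
  let step : Int := 2 <<< k.toNat
  (PySem.List.pyRange 0 (a.length : Int) step).foldl (fun a i => anfInner i halfstep a) a

def anf (arr : List Int) : List Int :=
  let n : Int := log2ceil (arr.length : Int)
  if (arr.length : Int) = 2 ^ n.toNat then   -- the assert (n ≥ 0, so 2**n = 2 ^ n.toNat)
    (PySem.List.pyRange 0 n 1).foldl anfOuter arr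
  else arr   -- assert fails: Python raises AssertionError; excluded by Pre_anf

-- ===== PORT B =====
-- recursive helper _anf_rec: a[:h], a[h:] are take/drop (0 ≤ h ≤ len(a)),
-- len(a)//2 on a nonnegative length is Nat division
def anfRec (a : List Int) : List Int :=
  if _h : a.length ≤ 1 then a
  else
    let h := a.length / 2
    let L := anfRec (a.take h)
    let R := anfRec (a.drop h)
    L ++ (R.zip L).map (fun p => PySem.Int.bxor p.1 p.2)
termination_by a.length
decreasing_by
  · simp only [List.length_take]; omega
  · simp only [List.length_drop]; omega

def anf_alt (arr : List Int) : List Int :=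
  let n : Int := log2ceil (arr.length : Int)
  if (arr.length : Int) = 2 ^ n.toNat then anfRec arr
  else arr   -- assert fails, as in A

-- ===== PRECONDITION & SPEC =====
-- exactly the inputs on which A's assert passes: len(arr) == 2**(len(arr)-1).bit_length(),
-- i.e. the length is a power of two; on every other length A raises AssertionError
def Pre_anf (arr : List Int) : Prop :=
  (arr.length : Int) = 2 ^ PySem.Int.bitLength ((arr.length : Int) - 1)
instance (arr : List Int) : Decidable (Pre_anf arr) := by unfold Pre_anf; infer_instance

def pvWitness_anf : List Int := [3, 0, -1, 7]

def Spec_anf (arr : List Int) (out : List Int) : Prop := out = anf_alt arr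
instance (arr : List Int) (out : List Int) : Decidable (Spec_anf arr out) := by
  unfold Spec_anf; infer_instance

-- ===== CLAIM (what is proved, stated in full; the proofs are below) =====
def Claim_equal_anf : Prop := ∀ (arr : List Int), Dom_anf arr → Pre_anf arr → Spec_anf arr (anf arr)

-- ===== LEMMAS AND PROOFS =====

-- one stage of A, expressed blockwise: c blocks of size 2*h; each block l ++ r
-- becomes l ++ [rj ^ lj for rj, lj in zip(r, l)]
def stageAux (h : Nat) : Nat → List Int → List Int
  | 0, a => a
  | c+1, a =>
      a.take h ++ (((a.drop h).take h).zip (a.take h)).map (fun p => PySem.Int.bxor p.1 p.2)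
        ++ stageAux h c (a.drop (2*h))

lemma pyRange_pos_nil {a b s : Int} (hs : 0 < s) (hba : b ≤ a) :
    PySem.List.pyRange a b s = [] := by
  rw [PySem.List.pyRange_of_pos _ _ hs]
  simp [if_neg (not_lt.mpr hba)]

lemma pyRange_pos_cons {a b s : Int} (hs : 0 < s) (hab : a < b) :
    PySem.List.pyRange a b s = a :: PySem.List.pyRange (a + s) b s := by
  rw [PySem.List.pyRange_of_pos _ _ hs, PySem.List.pyRange_of_pos _ _ hs]
  have key : (b - a + s - 1) / s = (b - (a + s) + s - 1) / s + 1 := by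
    have h1 : b - a + s - 1 = (b - (a + s) + s - 1) + 1 * s := by ring
    rw [h1, Int.add_mul_ediv_right _ _ (ne_of_gt hs)]
  by_cases h2 : a + s < b
  · have h0 : 0 ≤ (b - (a + s) + s - 1) / s := Int.ediv_nonneg (by omega) (le_of_lt hs)
    have hn : ((b - a + s - 1) / s).toNat = ((b - (a + s) + s - 1) / s).toNat + 1 := by omega
    simp only [if_pos hab, if_pos h2, hn]
    rw [List.range_succ_eq_map]
    simp only [List.map_cons, List.map_map, Nat.cast_zero, mul_zero, add_zero]
    congr 1
    refine List.map_congr_left (fun k _ => ?_)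
    simp only [Function.comp_apply]
    push_cast
    ring
  · have hcnt : (b - a + s - 1) / s = 1 := by
      have h1 : b - a + s - 1 = (b - a - 1) + 1 * s := by ring
      rw [h1, Int.add_mul_ediv_right _ _ (ne_of_gt hs)]
      have : (b - a - 1) / s = 0 := Int.ediv_eq_zero_of_lt (by omega) (by omega)
      omega
    simp only [if_pos hab, if_neg h2, hcnt]
    norm_num

lemma innerGo (l : List Int) : ∀ (r w pre post : List Int),
    w.length + r.length = l.length →
    (PySem.List.pyRange ((w.length : Nat) : Int) ((l.length : Nat) : Int) 1).foldl
      (fun a j => PySem.List.pySetD a (((pre.length : Nat) : Int) + j + ((l.length : Nat) : Int))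
        (PySem.Int.bxor
          (PySem.List.pyGetD a (((pre.length : Nat) : Int) + j + ((l.length : Nat) : Int)) 0)
          (PySem.List.pyGetD a (((pre.length : Nat) : Int) + j) 0)))
      (pre ++ (l ++ (w ++ (r ++ post))))
    = pre ++ (l ++ (w ++ (((r.zip (l.drop w.length)).map (fun p => PySem.Int.bxor p.1 p.2)) ++ post))) := by
  intro r
  induction r with
  | nil =>
    intro w pre post hw
    simp only [List.length_nil] at hw
    rw [PySem.List.pyRange_one_eq_nil (by omega)]
    simp
  | cons x rt ih =>
    intro w pre post hw
    simp only [List.length_cons] at hw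
    have hq : w.length < l.length := by omega
    simp only [List.cons_append]
    set A := pre ++ (l ++ (w ++ (x :: (rt ++ post)))) with hA
    rw [PySem.List.pyRange_one_cons (by exact_mod_cast hq)]
    simp only [List.foldl_cons]
    have e1 : ((pre.length : Int) + (w.length : Int)) = ((pre.length + w.length : Nat) : Int) := by
      push_cast; ring
    have e2 : ((pre.length : Int) + (w.length : Int) + (l.length : Int))
        = ((pre.length + (w.length + l.length) : Nat) : Int) := by push_cast; ring
    have hsrc : PySem.List.pyGetD A ((pre.length : Int) + (w.length : Int)) 0 = l[w.length] := by
      rw [hA, e1, PySem.List.pyGetD_natCast]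
      rw [List.getD_append_right _ _ _ _ (by omega)]
      rw [show pre.length + w.length - pre.length = w.length from by omega]
      rw [List.getD_append _ _ _ _ hq]
      exact List.getD_eq_getElem l 0 hq
    have hdst : PySem.List.pyGetD A ((pre.length : Int) + (w.length : Int) + (l.length : Int)) 0
        = x := by
      rw [hA, e2, PySem.List.pyGetD_natCast]
      rw [List.getD_append_right _ _ _ _ (by omega)]
      rw [show pre.length + (w.length + l.length) - pre.length = w.length + l.length from by omega]
      rw [List.getD_append_right _ _ _ _ (by omega)]
      rw [show w.length + l.length - l.length = w.length from by omega]
      rw [List.getD_append_right _ _ _ _ (by omega)]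
      rw [show w.length - w.length = 0 from by omega]
      rfl
    have hset : PySem.List.pySetD A ((pre.length : Int) + (w.length : Int) + (l.length : Int))
        (PySem.Int.bxor x l[w.length])
        = pre ++ (l ++ ((w ++ [PySem.Int.bxor x l[w.length]]) ++ (rt ++ post))) := by
      rw [hA, e2, PySem.List.pySetD_natCast]
      rw [List.set_append, if_neg (by omega)]
      rw [show pre.length + (w.length + l.length) - pre.length = w.length + l.length from by omega]
      rw [List.set_append, if_neg (by omega)]
      rw [show w.length + l.length - l.length = w.length from by omega]
      rw [List.set_append, if_neg (by omega)]
      rw [show w.length - w.length = 0 from by omega]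
      simp [List.append_assoc]
    rw [hdst, hsrc, hset]
    have hcond : (w ++ [PySem.Int.bxor x l[w.length]]).length + rt.length = l.length := by
      simp; omega
    have IH := ih (w ++ [PySem.Int.bxor x l[w.length]]) pre post hcond
    have e3 : (((w ++ [PySem.Int.bxor x l[w.length]]).length : Nat) : Int)
        = (w.length : Int) + 1 := by simp
    rw [e3] at IH
    rw [IH]
    have e4 : (w ++ [PySem.Int.bxor x l[w.length]]).length = w.length + 1 := by simp
    rw [e4, List.drop_eq_getElem_cons hq]
    simp only [List.zip_cons_cons, List.map_cons, List.append_assoc, List.cons_append,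
      List.nil_append]

lemma inner_spec (pre l r post : List Int) (hrl : r.length = l.length) :
    anfInner ((pre.length : Nat) : Int) ((l.length : Nat) : Int) (pre ++ (l ++ (r ++ post)))
      = pre ++ (l ++ (((r.zip l).map (fun p => PySem.Int.bxor p.1 p.2)) ++ post)) := by
  have h := innerGo l r [] pre post (by simpa using hrl)
  simpa [anfInner] using h

lemma length_anfInner (i h : Int) (a : List Int) : (anfInner i h a).length = a.length := by
  unfold anfInner
  generalize PySem.List.pyRange 0 h 1 = js
  induction js generalizing a with
  | nil => rfl
  | cons j js ih => simp only [List.foldl_cons]; rw [ih, PySem.List.length_pySetD]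

lemma length_foldl_innerloop (hs : Int) : ∀ (is : List Int) (a : List Int),
    (is.foldl (fun a i => anfInner i hs a) a).length = a.length := by
  intro is
  induction is with
  | nil => intro a; rfl
  | cons i is ih => intro a; simp only [List.foldl_cons]; rw [ih, length_anfInner]

lemma length_anfOuter (a : List Int) (k : Int) : (anfOuter a k).length = a.length := by
  simp only [anfOuter]
  exact length_foldl_innerloop _ _ a

lemma length_foldl_outer (ks : List Int) (a : List Int) :
    (ks.foldl anfOuter a).length = a.length := by
  induction ks generalizing a with
  | nil => rfl
  | cons k ks ih => simp only [List.foldl_cons]; rw [ih, length_anfOuter]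

lemma outerGo (h : Nat) (hh : 0 < h) : ∀ (c : Nat) (pre a : List Int),
    a.length = c * (2 * h) →
    (PySem.List.pyRange ((pre.length : Nat) : Int)
        (((pre.length : Nat) : Int) + ((a.length : Nat) : Int)) ((2 * h : Nat) : Int)).foldl
      (fun a i => anfInner i ((h : Nat) : Int) a) (pre ++ a)
    = pre ++ stageAux h c a := by
  intro c
  induction c with
  | zero =>
    intro pre a ha
    have : a = [] := List.eq_nil_of_length_eq_zero (by simpa using ha)
    subst this
    rw [pyRange_pos_nil (by exact_mod_cast hh.trans_le (by omega)) (by simp)]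
    simp [stageAux]
  | succ c ih =>
    intro pre a ha
    have h2h : 2 * h ≤ a.length := by
      rw [ha]
      calc 2 * h = 1 * (2 * h) := by ring
        _ ≤ (c + 1) * (2 * h) := Nat.mul_le_mul_right _ (by omega)
    set l := a.take h with hld
    set r := (a.drop h).take h with hrd
    set rest := a.drop (2 * h) with hrestd
    have hl : l.length = h := by rw [hld]; simp [List.length_take]; omega
    have hr : r.length = h := by rw [hrd]; simp [List.length_take, List.length_drop]; omega
    have hrest : rest.length = c * (2 * h) := by
      rw [hrestd, List.length_drop, ha, show (c + 1) * (2 * h) = c * (2 * h) + 2 * h from by ring,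
        Nat.add_sub_cancel]
    have hrest' : rest.length = a.length - 2 * h := by rw [hrestd, List.length_drop]
    have e : a.drop (2 * h) = (a.drop h).drop h := by
      rw [List.drop_drop]; congr 1; omega
    have hsplit : a = l ++ (r ++ rest) := by
      rw [hld, hrd, hrestd, e, List.take_append_drop, List.take_append_drop]
    have hblen : ((a.length : Nat) : Int) = ((2 * h : Nat) : Int) + ((rest.length : Nat) : Int) := by
      omega
    rw [hblen]
    rw [pyRange_pos_cons (by exact_mod_cast hh.trans_le (by omega))
      (by have : 0 < h := hh; omega)]
    simp only [List.foldl_cons]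
    conv_lhs => rw [hsplit]
    have h1 : anfInner ((pre.length : Nat) : Int) ((h : Nat) : Int) (pre ++ (l ++ (r ++ rest)))
        = pre ++ (l ++ (((r.zip l).map (fun p => PySem.Int.bxor p.1 p.2)) ++ rest)) := by
      rw [show ((h : Nat) : Int) = ((l.length : Nat) : Int) from by rw [hl]]
      exact inner_spec pre l r rest (hr.trans hl.symm)
    rw [h1]
    have IH := ih (pre ++ (l ++ (r.zip l).map (fun p => PySem.Int.bxor p.1 p.2))) rest hrest
    have e1 : (((pre ++ (l ++ (r.zip l).map (fun p => PySem.Int.bxor p.1 p.2))).length : Nat) : Int)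
        = ((pre.length : Nat) : Int) + ((2 * h : Nat) : Int) := by
      have hzl : ((r.zip l).map (fun p => PySem.Int.bxor p.1 p.2)).length = h := by
        simp [List.length_zip, hr, hl]
      simp only [List.length_append, hl, hzl]
      push_cast; ring
    rw [e1] at IH
    rw [show ((pre.length : Nat) : Int) + ((2 * h : Nat) : Int) + ((rest.length : Nat) : Int)
        = ((pre.length : Nat) : Int) + (((2 * h : Nat) : Int) + ((rest.length : Nat) : Int)) from by
      ring] at IH
    simp only [List.append_assoc] at IH
    rw [IH]
    have hstage : stageAux h (c + 1) a
        = l ++ (((r.zip l).map (fun p => PySem.Int.bxor p.1 p.2)) ++ stageAux h c rest) := by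
      simp only [stageAux, ← hld, ← hrd, ← hrestd, List.append_assoc]
    rw [hstage]

lemma outer_eq_stage (kn c : Nat) (a : List Int) (ha : a.length = c * (2 * 2 ^ kn)) :
    anfOuter a ((kn : Nat) : Int) = stageAux (2 ^ kn) c a := by
  have h1 := outerGo (2 ^ kn) (by positivity) c [] a ha
  simp only [List.length_nil, Nat.cast_zero, zero_add, List.nil_append] at h1
  simp only [anfOuter, Int.toNat_natCast]
  rw [show (1 <<< kn : Nat) = 2 ^ kn from by simp [Nat.shiftLeft_eq],
      show (2 <<< kn : Nat) = 2 * 2 ^ kn from by simp [Nat.shiftLeft_eq]]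
  exact h1

lemma stageAux_append (h : Nat) : ∀ (c1 c2 : Nat) (L R : List Int),
    L.length = c1 * (2 * h) →
    stageAux h (c1 + c2) (L ++ R) = stageAux h c1 L ++ stageAux h c2 R := by
  intro c1
  induction c1 with
  | zero =>
    intro c2 L R hL
    have : L = [] := List.eq_nil_of_length_eq_zero (by simpa using hL)
    subst this
    simp [stageAux]
  | succ c1 ih =>
    intro c2 L R hL
    have h2h : 2 * h ≤ L.length := by
      rw [hL]
      calc 2 * h = 1 * (2 * h) := by ring
        _ ≤ (c1 + 1) * (2 * h) := Nat.mul_le_mul_right _ (by omega)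
    have hLd : (L.drop (2 * h)).length = c1 * (2 * h) := by
      rw [List.length_drop, hL, show (c1 + 1) * (2 * h) = c1 * (2 * h) + 2 * h from by ring,
        Nat.add_sub_cancel]
    rw [show c1 + 1 + c2 = (c1 + c2) + 1 from by omega]
    simp only [stageAux]
    rw [List.take_append_of_le_length (show h ≤ L.length from by omega),
        List.drop_append_of_le_length (show h ≤ L.length from by omega),
        List.take_append_of_le_length (show h ≤ (L.drop h).length from by
          rw [List.length_drop]; omega),
        List.drop_append_of_le_length h2h]
    rw [ih c2 (L.drop (2 * h)) R hLd]
    simp [List.append_assoc]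

lemma foldl_split (n : Nat) : ∀ (m : Nat), m ≤ n → ∀ (L R : List Int),
    L.length = 2 ^ n → R.length = 2 ^ n →
    (PySem.List.pyRange 0 ((m : Nat) : Int) 1).foldl anfOuter (L ++ R)
      = (PySem.List.pyRange 0 ((m : Nat) : Int) 1).foldl anfOuter L
        ++ (PySem.List.pyRange 0 ((m : Nat) : Int) 1).foldl anfOuter R := by
  intro m
  induction m with
  | zero =>
    intro _ L R _ _
    rw [show (((0 : Nat)) : Int) = 0 from by norm_num, PySem.List.pyRange_one_eq_nil le_rfl]
    simp
  | succ m ih =>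
    intro hm L R hL hR
    rw [show (((m + 1 : Nat)) : Int) = (m : Int) + 1 from by push_cast; ring,
        PySem.List.pyRange_one_succ_right (by exact_mod_cast Nat.zero_le m)]
    simp only [List.foldl_append, List.foldl_cons, List.foldl_nil]
    rw [ih (by omega) L R hL hR]
    have hpow : 2 ^ (n - (m + 1)) * (2 * 2 ^ m) = 2 ^ n := by
      rw [show 2 * 2 ^ m = 2 ^ (m + 1) from by rw [pow_succ]; ring, ← pow_add]
      congr 1; omega
    have hFL : ((PySem.List.pyRange 0 ((m : Nat) : Int) 1).foldl anfOuter L).length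
        = 2 ^ (n - (m + 1)) * (2 * 2 ^ m) := by rw [length_foldl_outer, hL, hpow]
    have hFR : ((PySem.List.pyRange 0 ((m : Nat) : Int) 1).foldl anfOuter R).length
        = 2 ^ (n - (m + 1)) * (2 * 2 ^ m) := by rw [length_foldl_outer, hR, hpow]
    rw [outer_eq_stage m (2 ^ (n - (m + 1)) + 2 ^ (n - (m + 1)))
        ((PySem.List.pyRange 0 ((m : Nat) : Int) 1).foldl anfOuter L
          ++ (PySem.List.pyRange 0 ((m : Nat) : Int) 1).foldl anfOuter R)
        (by rw [List.length_append, hFL, hFR]; ring)]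
    rw [stageAux_append (2 ^ m) _ _ _ _ hFL]
    rw [← outer_eq_stage m _ _ hFL, ← outer_eq_stage m _ _ hFR]

lemma loop_eq_rec : ∀ (nn : Nat) (arr : List Int), arr.length = 2 ^ nn →
    (PySem.List.pyRange 0 ((nn : Nat) : Int) 1).foldl anfOuter arr = anfRec arr := by
  intro nn
  induction nn with
  | zero =>
    intro arr ha
    rw [anfRec.eq_def, dif_pos (by simp [ha])]
    rw [show (((0 : Nat)) : Int) = 0 from by norm_num, PySem.List.pyRange_one_eq_nil le_rfl]
    simp
  | succ nn ih =>
    intro arr ha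
    have hpow : (2 : Nat) ^ (nn + 1) = 2 * 2 ^ nn := by rw [pow_succ]; ring
    have hL : (arr.take (2 ^ nn)).length = 2 ^ nn := by
      simp only [List.length_take, ha, hpow]; omega
    have hR : (arr.drop (2 ^ nn)).length = 2 ^ nn := by
      simp only [List.length_drop, ha, hpow]; omega
    rw [show (((nn + 1 : Nat)) : Int) = (nn : Int) + 1 from by push_cast; ring,
        PySem.List.pyRange_one_succ_right (by exact_mod_cast Nat.zero_le nn)]
    simp only [List.foldl_append, List.foldl_cons, List.foldl_nil]
    conv_lhs => rw [show arr = arr.take (2 ^ nn) ++ arr.drop (2 ^ nn) from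
      (List.take_append_drop _ _).symm]
    rw [foldl_split nn nn le_rfl _ _ hL hR]
    have hFL : ((PySem.List.pyRange 0 ((nn : Nat) : Int) 1).foldl anfOuter
        (arr.take (2 ^ nn))).length = 2 ^ nn := by rw [length_foldl_outer, hL]
    have hFR : ((PySem.List.pyRange 0 ((nn : Nat) : Int) 1).foldl anfOuter
        (arr.drop (2 ^ nn))).length = 2 ^ nn := by rw [length_foldl_outer, hR]
    rw [outer_eq_stage nn 1 _ (by rw [List.length_append, hFL, hFR]; ring)]
    simp only [stageAux]
    rw [List.take_left' hFL, List.drop_left' hFL, List.take_of_length_le (le_of_eq hFR),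
        List.drop_eq_nil_of_le (show ((PySem.List.pyRange 0 ((nn : Nat) : Int) 1).foldl anfOuter
            (arr.take (2 ^ nn)) ++ (PySem.List.pyRange 0 ((nn : Nat) : Int) 1).foldl anfOuter
            (arr.drop (2 ^ nn))).length ≤ 2 * 2 ^ nn from by
          rw [List.length_append, hFL, hFR]; omega)]
    have hpos : 0 < 2 ^ nn := Nat.two_pow_pos nn
    rw [anfRec.eq_def, dif_neg (by rw [ha, hpow]; omega)]
    have hdiv : arr.length / 2 = 2 ^ nn := by rw [ha, hpow]; omega
    simp only [hdiv]
    rw [← ih _ hL, ← ih _ hR]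
    simp

-- ===== VERDICT (by name: the statement is the Claim_ definition above) =====
theorem anf_spec : Claim_equal_anf := by
  intro arr _dom hpre
  unfold Pre_anf at hpre
  unfold Spec_anf
  simp only [anf, anf_alt, log2ceil, Int.toNat_natCast]
  rw [if_pos hpre, if_pos hpre]
  exact loop_eq_rec _ arr (by exact_mod_cast hpre)
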